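-- pv_equiv track=rewrite | github.com/rayvoelker/adventofcode2019 | day_04.py | has_only_double
-- ===== SOURCE A (Python) =====
-- def has_only_double(value):
--     """
--     >>> has_only_double(112233)
--     True
--
--     >>> has_only_double(123444)
--     False
--
--     >>> has_only_double(111122)
--     True
--
--     >>> has_only_double(124444)
--     False
--
--     >>> has_only_double(113444)
--     True
--     """
--
--     only_double = False
--     string = str(value)
--     prev_string = ''
--     match_count = 0
--     for i in range(len(string)):
--         if string[i] == prev_string:
--             match_count += 1
--         else:
--             if match_count == 1:
--                 return True
--             match_count = 0
--
--         if match_count == 1: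
--             only_double = True
--
--         if match_count > 1:
--             only_double = False
--
--         prev_string = string[i]
--
--     return only_double
-- ===== SOURCE B (Python) =====
-- def has_only_double(value):
--     s = str(value)
--     eq = [a == b for a, b in zip(s, s[1:])]
--     return any(e and not before and not after
--                for before, e, after in zip([False] + eq, eq, eq[1:] + [False]))
-- ===== Notes on version B (the rewrite author's own statement) =====
-- stated objective: alternative
-- what changed: B drops A's stateful run counter with early return entirely: it builds the adjacent-equality boolean mask eq[i] = (s[i] == s[i+1]) and then detects an exact pair as an isolated True in that mask (a True whose shifted neighbors are both False), via zips of the mask with itself shifted.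
import Mathlib
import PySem

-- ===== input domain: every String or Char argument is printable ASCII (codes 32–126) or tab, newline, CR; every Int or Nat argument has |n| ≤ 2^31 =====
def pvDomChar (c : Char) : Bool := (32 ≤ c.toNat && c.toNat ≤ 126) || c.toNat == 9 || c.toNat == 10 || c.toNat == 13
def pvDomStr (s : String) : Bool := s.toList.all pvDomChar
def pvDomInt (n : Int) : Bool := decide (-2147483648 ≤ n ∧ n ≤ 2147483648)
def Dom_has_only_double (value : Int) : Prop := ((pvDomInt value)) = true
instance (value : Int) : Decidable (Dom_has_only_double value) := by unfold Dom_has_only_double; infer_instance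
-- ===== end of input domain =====

-- B abandons A's stateful run counter: it builds the adjacent-equality mask of str(value) and
-- detects an exact pair as an isolated True in that mask (zips of the mask with itself shifted).

-- ===== PORT A =====
-- A's loop: state = (prev char as Option Char for prev_string ('' = none), match_count, only_double);
-- early 'return True' becomes an immediate true result.
def hodLoopA : List Char → Option Char → Nat → Bool → Bool
  | [], _, _, od => od
  | c :: rest, prev, mc, od =>
    if some c = prev then
      let mc' := mc + 1
      let od' := if mc' = 1 then true else od
      let od'' := if mc' > 1 then false else od'
      hodLoopA rest (some c) mc' od''
    else
      if mc = 1 then true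
      else
        let od' := if (0 : Nat) = 1 then true else od
        let od'' := if (0 : Nat) > 1 then false else od'
        hodLoopA rest (some c) 0 od''

def has_only_double (value : Int) : Bool :=
  hodLoopA (PySem.Int.toStr value).toList none 0 false

-- ===== PORT B =====
-- Source B: eq = [a == b for a, b in zip(s, s[1:])];  s[1:] on a list of chars is `tail`;
-- Python's zip truncates to the shorter argument, exactly like zipWith/zipWith3.
def has_only_double_alt (value : Int) : Bool :=
  let s := (PySem.Int.toStr value).toList
  let eq := List.zipWith (fun a b => a == b) s s.tail
  (List.zipWith3 (fun before e after => e && !before && !after)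
      (false :: eq) eq (eq.tail ++ [false])).any id

-- ===== PRECONDITION & SPEC =====
def Spec_has_only_double (value : Int) (out : Bool) : Prop := out = has_only_double_alt value
instance (value : Int) (out : Bool) : Decidable (Spec_has_only_double value out) := by unfold Spec_has_only_double; infer_instance

-- ===== CLAIM (what is proved, stated in full; the proofs are below) =====
def Claim_equal_has_only_double : Prop := ∀ (value : Int), Dom_has_only_double value → Spec_has_only_double value (has_only_double value)

-- ===== LEMMAS AND PROOFS =====

-- adjacency-equality mask of c :: rest (proof-only helper)
def hodE : Char → List Char → List Bool
  | _, [] => []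
  | c, d :: t => (c == d) :: hodE d t

-- "some True with both neighbors False" scanned recursively with the previous bit as state
def hodIso : Bool → List Bool → Bool
  | _, [] => false
  | prev, e :: rest => (e && !prev && !(rest.headD false)) || hodIso e rest

theorem hodE_eq_zip (rest : List Char) : ∀ c, List.zipWith (fun a b => a == b) (c :: rest) rest = hodE c rest := by
  induction rest with
  | nil => intro c; rfl
  | cons d t ih => intro c; simp [hodE, List.zipWith, ih d]

theorem zip3_eq_iso (eq : List Bool) : ∀ prev,
    (List.zipWith3 (fun before e after => e && !before && !after)
        (prev :: eq) eq (eq.tail ++ [false])).any id = hodIso prev eq := by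
  induction eq with
  | nil => intro prev; rfl
  | cons e rest ih =>
    intro prev
    cases rest with
    | nil => simp [List.zipWith3, hodIso]
    | cons x xs =>
      have h := ih e
      simp only [List.tail_cons] at h ⊢
      simp only [List.cons_append, List.zipWith3, List.any_cons, hodIso, id]
      rw [h]
      simp [hodIso]

-- invariant linking A's loop state (prev run char c, match_count mc, only_double = (mc = 1))
-- to the isolated-True scan over the remaining mask; the first disjunct is the pending decision
-- about the pair that just completed when mc = 1.
theorem hodLoop_iso (rest : List Char) : ∀ (c : Char) (mc : Nat),
    hodLoopA rest (some c) mc (decide (mc = 1))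
      = ((decide (mc = 1) && !((hodE c rest).headD false)) || hodIso (decide (1 ≤ mc)) (hodE c rest)) := by
  induction rest with
  | nil =>
    intro c mc
    by_cases hmc : mc = 1 <;> simp [hodLoopA, hodE, hodIso, hmc]
  | cons d t ih =>
    intro c mc
    by_cases hdc : d = c
    · subst hdc
      have hflag : (if mc + 1 > 1 then false else if mc + 1 = 1 then true else decide (mc = 1))
          = decide (mc + 1 = 1) := by split_ifs <;> simp <;> omega
      simp only [hodLoopA, hflag]
      rw [ih d (mc + 1)]
      have h1 : decide (mc + 1 = 1) = decide (mc = 0) := decide_eq_decide.mpr (by omega)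
      have h2 : decide (1 ≤ mc + 1) = true := by simp
      simp only [hodE, hodIso, h1, h2, beq_self_eq_true]
      by_cases h : mc = 0
      · simp [h]
      · have h1' : decide (1 ≤ mc) = true := by simp; omega
        simp [h, h1']
    · have hne : ¬ (some d = some c) := by simpa using hdc
      have hb' : (c == d) = false := by
        have : c ≠ d := fun h => hdc h.symm
        simpa using this
      simp only [hodLoopA, if_neg hne]
      by_cases hmc : mc = 1
      · simp [hmc, hodE, hodIso, hb']
      · rw [if_neg hmc]
        have hrec := ih d 0
        simp only [show (decide ((0:Nat) = 1)) = false from rfl, Bool.false_and, Bool.false_or,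
          show (decide (1 ≤ (0:Nat))) = false from rfl] at hrec
        simp only [if_neg (by omega : ¬ ((0:Nat) = 1)), if_neg (by omega : ¬ ((0:Nat) > 1)),
          decide_eq_false hmc]
        rw [hrec]
        simp [hodE, hodIso, hb']

theorem hodTop (s : List Char) :
    hodLoopA s none 0 false
      = (List.zipWith3 (fun before e after => e && !before && !after)
          (false :: List.zipWith (fun a b => a == b) s s.tail)
          (List.zipWith (fun a b => a == b) s s.tail)
          ((List.zipWith (fun a b => a == b) s s.tail).tail ++ [false])).any id := by
  cases s with
  | nil => rfl
  | cons c rest =>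
    rw [List.tail_cons, hodE_eq_zip rest c, zip3_eq_iso (hodE c rest) false]
    have h := hodLoop_iso rest c 0
    simp only [show (decide ((0:Nat) = 1)) = false from rfl,
      show (decide (1 ≤ (0:Nat))) = false from rfl, Bool.false_and, Bool.false_or] at h
    have hA : hodLoopA (c :: rest) none 0 false = hodLoopA rest (some c) 0 false := by
      simp [hodLoopA]
    rw [hA, ← h]

-- ===== VERDICT (by name: the statement is the Claim_ definition above) =====
theorem has_only_double_spec : Claim_equal_has_only_double := by
  intro v _
  unfold Spec_has_only_double has_only_double has_only_double_alt
  exact hodTop _
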